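-- pv_equiv track=rewrite | github.com/yigitk/table-extract | utils_streamlit.py | clean_column_names
-- ===== SOURCE A (Python) =====
-- def clean_column_names(headers):
--     """Clean column names by removing markdown formatting and handling duplicates"""
--     # Remove markdown table formatting characters and whitespace
--     cleaned = [h.strip('| ').strip() for h in headers]
--
--     # Remove empty column names
--     cleaned = [h if h else f'Column_{i+1}' for i, h in enumerate(cleaned)]
--
--     # Handle duplicates by adding numbers
--     seen = {}
--     result = []
--     for h in cleaned:
--         if h in seen:
--             seen[h] += 1
--             result.append(f'{h}_{seen[h]}')
--         else:
--             seen[h] = 0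
--             result.append(h)
--
--     return result
-- ===== SOURCE B (Python) =====
-- def clean_column_names(headers):
--     """Clean column names by removing markdown formatting and handling duplicates"""
--     names = [(h.strip('| ').strip() or f'Column_{i+1}') for i, h in enumerate(headers)]
--     # group-by-then-scatter: index every name's occurrence positions once,
--     # then write each occurrence's (rank-suffixed) name straight into its slot
--     groups = {}
--     for i, n in enumerate(names):
--         groups.setdefault(n, []).append(i)
--     result = [''] * len(names)
--     for n, idxs in groups.items():
--         for j, i in enumerate(idxs):
--             result[i] = n if j == 0 else f'{n}_{j}'
--     return result
-- ===== Notes on version B (the rewrite author's own statement) =====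
-- stated objective: alternative
-- what changed: B replaces A's sequential loop that mutates a seen-counter dict while appending by a group-by-then-scatter scheme: it builds a dict mapping each cleaned name to the list of all its occurrence positions, then fills a preallocated result list by writing each occurrence's rank-suffixed name directly into its slot.
import Mathlib
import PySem

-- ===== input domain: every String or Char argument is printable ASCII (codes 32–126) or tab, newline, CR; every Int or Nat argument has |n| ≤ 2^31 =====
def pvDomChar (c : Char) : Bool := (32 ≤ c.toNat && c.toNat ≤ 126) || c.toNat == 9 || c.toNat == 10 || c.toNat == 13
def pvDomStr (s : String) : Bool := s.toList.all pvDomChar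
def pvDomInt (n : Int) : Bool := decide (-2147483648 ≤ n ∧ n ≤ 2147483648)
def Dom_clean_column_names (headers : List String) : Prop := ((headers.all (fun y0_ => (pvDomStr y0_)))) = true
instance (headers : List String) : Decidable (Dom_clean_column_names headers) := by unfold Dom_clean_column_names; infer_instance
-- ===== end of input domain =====

-- B replaces A's sequential seen-counter loop by a group-by-then-scatter scheme: it indexes
-- every name's occurrence positions once in a dict of index lists, then writes each occurrence's
-- rank-suffixed name straight into a preallocated result slot (alternative decomposition).

-- ===== PORT A =====
def clean_column_names (headers : List String) : List String :=
  let cleaned := headers.map (fun h => PySem.Str.strip (PySem.Str.stripChars h "| "))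
  let cleaned2 := (PySem.List.enumerate cleaned 0).map
    (fun p => if p.2 ≠ "" then p.2 else "Column_" ++ PySem.Int.toStr (p.1 + 1))
  (cleaned2.foldl
    (fun st h =>
      match st.1.get? h with
      -- seen[h] += 1; result.append(f'{h}_{seen[h]}')  (the value read back after the increment is v + 1)
      | some v => (st.1.insert h (v + 1), st.2 ++ [h ++ "_" ++ PySem.Int.toStr (v + 1)])
      | none => (st.1.insert h 0, st.2 ++ [h]))
    ((PySem.Dict.empty : PySem.Dict String Int), ([] : List String))).2

-- ===== PORT B =====
def clean_column_names_alt (headers : List String) : List String :=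
  let names := (PySem.List.enumerate headers 0).map
    (fun p =>
      let name := PySem.Str.strip (PySem.Str.stripChars p.2 "| ")
      if name ≠ "" then name else "Column_" ++ PySem.Int.toStr (p.1 + 1))
  -- groups.setdefault(n, []).append(i)  ==  groups[n] = groups.get(n, []) + [i]
  let groups := (PySem.List.enumerate names 0).foldl
    (fun d p => PySem.Dict.modify d p.2 [] (fun l => l ++ [p.1]))
    (PySem.Dict.empty : PySem.Dict String (List Int))
  let init := List.replicate names.length ""
  -- result[i] = …: i is an enumerate index into names, so 0 ≤ i < len(names); .toNat is exact here
  groups.items.foldl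
    (fun r q =>
      (PySem.List.enumerate q.2 0).foldl
        (fun r w => r.set w.2.toNat (if w.1 = 0 then q.1 else q.1 ++ "_" ++ PySem.Int.toStr w.1))
        r)
    init

-- ===== PRECONDITION & SPEC =====
def Spec_clean_column_names (headers : List String) (out : List String) : Prop := out = clean_column_names_alt headers
instance (headers : List String) (out : List String) : Decidable (Spec_clean_column_names headers out) := by unfold Spec_clean_column_names; infer_instance

-- ===== CLAIM (what is proved, stated in full; the proofs are below) =====
def Claim_equal_clean_column_names : Prop := ∀ (headers : List String), Dom_clean_column_names headers → Spec_clean_column_names headers (clean_column_names headers)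

-- ===== LEMMAS AND PROOFS =====

/-- Common specification: rename `post` given that `pre` was already emitted. -/
def pvSpec (pre : List String) : List String → List String
  | [] => []
  | n :: t =>
    (if pre.count n = 0 then n
     else n ++ "_" ++ PySem.Int.toStr ((pre.count n : Nat) : Int)) :: pvSpec (pre ++ [n]) t

/-- The ascending list of indices (from offset `s`) at which `n` occurs in `l`. -/
def pvOcc (s : Int) (l : List String) (n : String) : List Int :=
  ((PySem.List.enumerate l s).filter (fun p => p.2 == n)).map (·.1)

lemma pvEnum_map (f : String → String) : ∀ (xs : List String) (s : Int),
    PySem.List.enumerate (xs.map f) s = (PySem.List.enumerate xs s).map (fun p => (p.1, f p.2)) := by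
  intro xs
  induction xs with
  | nil => intro s; simp [PySem.List.enumerate_nil]
  | cons x t ih => intro s; simp [PySem.List.enumerate_cons, ih]

lemma pvA_loop : ∀ (ns pre : List String) (d : PySem.Dict String Int) (res : List String),
    (∀ h, d.get? h = if pre.count h = 0 then none else some ((pre.count h : Int) - 1)) →
    (ns.foldl
      (fun st h =>
        match st.1.get? h with
        | some v => (st.1.insert h (v + 1), st.2 ++ [h ++ "_" ++ PySem.Int.toStr (v + 1)])
        | none => (st.1.insert h 0, st.2 ++ [h]))
      (d, res)).2 = res ++ pvSpec pre ns := by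
  intro ns
  induction ns with
  | nil => intro pre d res _; simp [pvSpec]
  | cons n t ih =>
    intro pre d res hinv
    by_cases hc : pre.count n = 0
    · have hget : d.get? n = none := by rw [hinv n]; simp [hc]
      simp only [List.foldl_cons, hget]
      rw [ih (pre ++ [n]) _ _ ?_]
      · simp [pvSpec, hc]
      · intro h
        rw [PySem.Dict.get?_insert]
        by_cases hhn : h = n
        · subst hhn; simp [hc, List.count_append]
        · have hnh : ¬ n = h := fun e => hhn e.symm
          simp [hhn, hnh, hinv h, List.count_append]
    · have hget : d.get? n = some ((pre.count n : Int) - 1) := by rw [hinv n]; simp [hc]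
      simp only [List.foldl_cons, hget]
      rw [ih (pre ++ [n]) _ _ ?_]
      · simp [pvSpec, hc]
      · intro h
        rw [PySem.Dict.get?_insert]
        by_cases hhn : h = n
        · subst hhn
          have hcnt : (pre ++ [h]).count h = pre.count h + 1 := by
            simp [List.count_append]
          simp [hcnt]
        · have hnh : ¬ n = h := fun e => hhn e.symm
          simp [hhn, hnh, hinv h, List.count_append]

/-- Element `k` of `pvSpec pre post`. -/
lemma pvSpec_getElem? : ∀ (post pre : List String) (k : Nat) (h : k < post.length),
    (pvSpec pre post)[k]? =
      some (if (pre ++ post.take k).count post[k] = 0 then post[k]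
            else post[k] ++ "_" ++ PySem.Int.toStr (((pre ++ post.take k).count post[k] : Nat) : Int)) := by
  intro post
  induction post with
  | nil => intro pre k h; simp at h
  | cons n t ih =>
    intro pre k h
    cases k with
    | zero => simp [pvSpec]
    | succ k =>
      simp only [pvSpec, List.getElem?_cons_succ, List.getElem_cons_succ, List.take_succ_cons]
      rw [ih (pre ++ [n]) k (by simpa using h)]
      simp [List.append_assoc]

lemma pvSpec_length : ∀ (post pre : List String), (pvSpec pre post).length = post.length := by
  intro post
  induction post with
  | nil => intro pre; simp [pvSpec]
  | cons n t ih => intro pre; simp [pvSpec, ih]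

/-- `pvOcc` unfolded on cons. -/
lemma pvOcc_cons (s : Int) (x : String) (t : List String) (n : String) :
    pvOcc s (x :: t) n = (if x == n then [s] else []) ++ pvOcc (s + 1) t n := by
  by_cases hx : x == n <;> simp [pvOcc, PySem.List.enumerate_cons, hx]

/-- The `c`-th occurrence index of `l[k]`, where `c` counts earlier occurrences, is `s + k`. -/
lemma pvOcc_getElem? : ∀ (l : List String) (k : Nat) (s : Int) (n : String),
    (h : k < l.length) → l[k] = n →
    (pvOcc s l n)[(l.take k).count n]? = some (s + k) := by
  intro l
  induction l with
  | nil => intro k s n h; simp at h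
  | cons x t ih =>
    intro k s n h hk
    cases k with
    | zero =>
      simp only [List.getElem_cons_zero] at hk
      subst hk
      simp [pvOcc_cons]
    | succ k =>
      simp only [List.getElem_cons_succ] at hk
      rw [pvOcc_cons, List.take_succ_cons, List.count_cons]
      by_cases hx : x = n
      · simp only [hx, beq_self_eq_true, if_true, List.singleton_append, List.getElem?_cons_succ]
        rw [ih k (s + 1) n (by simpa using h) hk]
        congr 1
        push_cast
        ring
      · have hx' : ¬ (n = x) := fun e => hx e.symm
        simp only [hx, beq_iff_eq, if_false, List.nil_append, Nat.add_zero]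
        rw [ih k (s + 1) n (by simpa using h) hk]
        congr 1
        push_cast
        ring

/-- Members of `pvOcc`. -/
lemma pvOcc_mem (s : Int) (l : List String) (n : String) (i : Int) (hi : i ∈ pvOcc s l n) :
    ∃ (k : Nat), k < l.length ∧ i = s + k ∧ l[k]! = n := by
  simp only [pvOcc, List.mem_map, List.mem_filter] at hi
  obtain ⟨p, ⟨hpm, hpn⟩, hp1⟩ := hi
  rw [PySem.List.mem_enumerate_iff] at hpm
  obtain ⟨k, hk, rfl⟩ := hpm
  refine ⟨k, hk, by simpa using hp1.symm, ?_⟩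
  simp only [beq_iff_eq] at hpn
  simp [getElem!_pos, hk, hpn]

lemma pvOcc_nodup (s : Int) (l : List String) (n : String) : (pvOcc s l n).Nodup := by
  have hp : (PySem.List.enumerate l s).Pairwise (fun p q => p.1 < q.1) :=
    PySem.List.pairwise_lt_enumerate l s
  have hf : (((PySem.List.enumerate l s).filter (fun p => p.2 == n))).Pairwise (fun p q => p.1 < q.1) :=
    hp.filter _
  unfold pvOcc
  rw [List.nodup_iff_pairwise_ne, List.pairwise_map]
  exact hf.imp (fun h => ne_of_lt h)

/-- A fold of `List.set`s keeps the length. -/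
lemma pvSet_len : ∀ (ws : List (Nat × String)) (r : List String),
    (ws.foldl (fun r p => r.set p.1 p.2) r).length = r.length := by
  intro ws
  induction ws with
  | nil => intro r; rfl
  | cons w t ih => intro r; rw [List.foldl_cons, ih]; simp

/-- A fold of `List.set`s leaves untouched indices alone. -/
lemma pvSet_untouched : ∀ (ws : List (Nat × String)) (r : List String) (i : Nat),
    i ∉ ws.map Prod.fst → (ws.foldl (fun r p => r.set p.1 p.2) r)[i]? = r[i]? := by
  intro ws
  induction ws with
  | nil => intro r i _; rfl
  | cons w t ih =>
    intro r i hni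
    simp only [List.map_cons, List.mem_cons, not_or] at hni
    rw [List.foldl_cons, ih _ _ hni.2, List.getElem?_set_ne (fun e => hni.1 e.symm)]

/-- With distinct keys, the unique write to `i` determines the final value at `i`. -/
lemma pvSet_write : ∀ (ws : List (Nat × String)) (r : List String) (i : Nat) (v : String),
    (i, v) ∈ ws → (ws.map Prod.fst).Nodup → i < r.length →
    (ws.foldl (fun r p => r.set p.1 p.2) r)[i]? = some v := by
  intro ws
  induction ws with
  | nil => intro r i v hm; simp at hm
  | cons w t ih =>
    intro r i v hm hnd hi
    simp only [List.map_cons, List.nodup_cons] at hnd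
    rw [List.foldl_cons]
    rcases List.mem_cons.1 hm with heq | hmt
    · have hw1 : w.1 = i := by rw [← heq]
      rw [pvSet_untouched t _ i (by rw [← hw1]; exact hnd.1), ← heq]
      simp [hi]
    · exact ih _ i v hmt hnd.2 (by simpa using hi)


/-- `getD` of the grouping fold is the occurrence-index list. -/
lemma pvGroups_getD (names : List String) (n : String) :
    ((PySem.List.enumerate names 0).foldl
        (fun d p => PySem.Dict.modify d p.2 [] (fun l => l ++ [p.1]))
        (PySem.Dict.empty : PySem.Dict String (List Int))).getD n [] = pvOcc 0 names n := by
  have h : (PySem.List.enumerate names 0).foldl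
        (fun d p => PySem.Dict.modify d p.2 [] (fun l => l ++ [p.1]))
        (PySem.Dict.empty : PySem.Dict String (List Int)) =
      ((PySem.List.enumerate names 0).map Prod.swap).foldl
        (fun d p => PySem.Dict.modify d p.1 [] (fun l => l ++ [p.2]))
        (PySem.Dict.empty : PySem.Dict String (List Int)) := by
    rw [List.foldl_map]
    rfl
  rw [h, PySem.Dict.getD_foldl_modify_append, PySem.Dict.getD_empty, List.nil_append]
  unfold pvOcc
  rw [List.filter_map, List.map_map]
  simp [Function.comp_def, Prod.swap]

/-- The value B scatters into slot `w.2`. -/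
def pvVal (q : String × List Int) (w : Int × Int) : Nat × String :=
  (w.2.toNat, if w.1 = 0 then q.1 else q.1 ++ "_" ++ PySem.Int.toStr w.1)

set_option maxHeartbeats 1000000 in
/-- B's scatter phase produces `pvSpec [] names`. -/
lemma pvB_main (names : List String) :
    (((PySem.List.enumerate names 0).foldl
        (fun d p => PySem.Dict.modify d p.2 [] (fun l => l ++ [p.1]))
        (PySem.Dict.empty : PySem.Dict String (List Int))).items.foldl
      (fun r q =>
        (PySem.List.enumerate q.2 0).foldl
          (fun r w => r.set w.2.toNat (if w.1 = 0 then q.1 else q.1 ++ "_" ++ PySem.Int.toStr w.1))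
          r)
      (List.replicate names.length ""))
    = pvSpec [] names := by
  set G := (PySem.List.enumerate names 0).foldl
        (fun d p => PySem.Dict.modify d p.2 [] (fun l => l ++ [p.1]))
        (PySem.Dict.empty : PySem.Dict String (List Int)) with hG
  have hnd : G.keys.Nodup := by
    rw [hG]
    exact PySem.Dict.nodup_keys_foldl_modify_key (PySem.List.enumerate names 0)
      (fun (p : Int × String) => p.2) [] (fun _ (p : Int × String) => fun l => l ++ [p.1])
      PySem.Dict.empty (by simp)
  have hkeys : G.keys = PySem.Set.ofList names := by
    rw [hG, PySem.Dict.keys_foldl_modify_key (PySem.List.enumerate names 0)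
      (fun (p : Int × String) => p.2) [] (fun _ (p : Int × String) => fun l => l ++ [p.1])]
    rw [PySem.List.map_snd_enumerate]
    rfl
  have hitems : G.items = (PySem.Set.ofList names).map (fun n => (n, pvOcc 0 names n)) := by
    rw [PySem.Dict.items_eq_map_keys G hnd [], hkeys]
    exact List.map_congr_left (fun n _ => by rw [pvGroups_getD])
  -- flatten the two nested loops into one list of (slot, value) writes
  have hinner : ∀ (q : String × List Int) (r : List String),
      (PySem.List.enumerate q.2 0).foldl
          (fun r w => r.set w.2.toNat (if w.1 = 0 then q.1 else q.1 ++ "_" ++ PySem.Int.toStr w.1)) r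
        = ((PySem.List.enumerate q.2 0).map (pvVal q)).foldl (fun r p => r.set p.1 p.2) r := by
    intro q r
    rw [List.foldl_map]
    rfl
  have hflat : G.items.foldl
      (fun r q =>
        (PySem.List.enumerate q.2 0).foldl
          (fun r w => r.set w.2.toNat (if w.1 = 0 then q.1 else q.1 ++ "_" ++ PySem.Int.toStr w.1)) r)
      (List.replicate names.length "")
      = (G.items.flatMap (fun q => (PySem.List.enumerate q.2 0).map (pvVal q))).foldl
          (fun r p => r.set p.1 p.2) (List.replicate names.length "") := by
    rw [List.foldl_flatMap]
    exact PySem.List.foldl_congr_mem G.items _ _ _ (fun acc q _ => hinner q acc)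
  rw [hflat, hitems]
  set ws := (((PySem.Set.ofList names).map (fun n => (n, pvOcc 0 names n))).flatMap
      (fun q => (PySem.List.enumerate q.2 0).map (pvVal q))) with hws
  -- the write slots are pairwise distinct
  have hkeysws : ws.map Prod.fst
      = (PySem.Set.ofList names).flatMap (fun n => (pvOcc 0 names n).map Int.toNat) := by
    rw [hws, List.map_flatMap, List.flatMap_map]
    congr 1
    funext n
    rw [List.map_map]
    have h2 : (Prod.fst ∘ pvVal (n, pvOcc 0 names n)) = (fun w => w.2.toNat) := rfl
    rw [h2]
    have h3 : (fun (w : Int × Int) => w.2.toNat) = (Int.toNat ∘ (fun w => w.2)) := rfl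
    rw [h3, ← List.map_map, PySem.List.map_snd_enumerate]
  have hndws : (ws.map Prod.fst).Nodup := by
    rw [hkeysws, List.nodup_flatMap]
    constructor
    · intro n _
      refine (pvOcc_nodup 0 names n).map_on ?_
      intro x hx y hy hxy
      obtain ⟨k, _, rfl, _⟩ := pvOcc_mem 0 names n x hx
      obtain ⟨k', _, rfl, _⟩ := pvOcc_mem 0 names n y hy
      simp only [zero_add] at hxy ⊢
      omega
    · refine (PySem.Set.nodup_ofList names).imp ?_
      intro a b hab x hxa hxb
      obtain ⟨i, hia, rfl⟩ := List.mem_map.1 hxa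
      obtain ⟨i', hib, hi'⟩ := List.mem_map.1 hxb
      obtain ⟨k, hk, rfl, hna⟩ := pvOcc_mem 0 names a i hia
      obtain ⟨k', hk', rfl, hnb⟩ := pvOcc_mem 0 names b i' hib
      have hkk : k = k' := by omega
      exact hab (by rw [← hna, hkk, hnb])
  -- each slot i receives exactly the pvSpec value
  have hwrite : ∀ (i : Nat) (h : i < names.length),
      ((i : Nat), if (names.take i).count names[i] = 0 then names[i]
        else names[i] ++ "_" ++ PySem.Int.toStr (((names.take i).count names[i] : Nat) : Int)) ∈ ws := by
    intro i h
    have hocc := pvOcc_getElem? names i 0 names[i] h rfl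
    have he : (PySem.List.enumerate (pvOcc 0 names names[i]) 0)[(names.take i).count names[i]]?
        = some ((0 + ((names.take i).count names[i] : Nat) : Int), 0 + (i : Int)) := by
      rw [PySem.List.getElem?_enumerate, hocc]
      rfl
    have hmem := List.mem_of_getElem? he
    refine List.mem_flatMap.2 ⟨(names[i], pvOcc 0 names names[i]),
      List.mem_map.2 ⟨names[i], (PySem.Set.mem_ofList names names[i]).2 (names.getElem_mem h), rfl⟩, ?_⟩
    refine List.mem_map.2 ⟨_, hmem, ?_⟩
    unfold pvVal
    simp only [zero_add, Int.toNat_natCast, Nat.cast_eq_zero]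
  -- pointwise comparison
  apply List.ext_getElem?
  intro i
  by_cases hi : i < names.length
  · rw [pvSet_write ws _ i _ (hwrite i hi) hndws (by simp [hi]),
      pvSpec_getElem? names [] i hi]
    simp
  · rw [List.getElem?_eq_none (by rw [pvSet_len]; simpa using hi),
      List.getElem?_eq_none (by rw [pvSpec_length]; omega)]

-- ===== VERDICT (by name: the statement is the Claim_ definition above) =====
set_option maxHeartbeats 400000 in
theorem clean_column_names_spec : Claim_equal_clean_column_names := by
  intro headers _
  unfold Spec_clean_column_names clean_column_names clean_column_names_alt
  dsimp only
  rw [pvEnum_map, List.map_map]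
  rw [pvA_loop _ ([] : List String) _ _ (by intro h; simp), List.nil_append]
  have hnames : ((PySem.List.enumerate headers 0).map
      ((fun p => if p.2 ≠ "" then p.2 else "Column_" ++ PySem.Int.toStr (p.1 + 1)) ∘
        (fun p => (p.1, PySem.Str.strip (PySem.Str.stripChars p.2 "| "))))) =
      ((PySem.List.enumerate headers 0).map
        (fun p =>
          let name := PySem.Str.strip (PySem.Str.stripChars p.2 "| ")
          if name ≠ "" then name else "Column_" ++ PySem.Int.toStr (p.1 + 1))) :=
    by simp only [Function.comp_def]
  rw [hnames]
  exact (pvB_main _).symm
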